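-- pv_equiv track=rewrite | github.com/cbg-ethz/epistasis-formulas | files/epistasis.py | gen_coordinate_tag
-- ===== SOURCE A (Python) =====
-- def gen_coordinate_tag(formula, order, w_tag):
--     #TODO: Write more clearly
--     #TODO: Optimize
--     aux = 1 << order
--     desc = list(w_tag)
--     for i, c in enumerate(desc):
--         if c not in '01':
--             aux >>= 1
--             if not (formula & aux):
--                 desc[i] = c.lower()
--     return 'u_' + ''.join(desc)
-- ===== SOURCE B (Python) =====
-- def gen_coordinate_tag(formula, order, w_tag):
--     # Count the non-binary slots first, then walk the tag back-to-front with an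
--     # increasing bit position, so no shifting mask state is carried.
--     m = sum(1 for c in w_tag if c not in '01')
--     out = []
--     p = order - m
--     for c in reversed(w_tag):
--         if c in '01':
--             out.append(c)
--         else:
--             if p < 0 or not formula & (1 << p):
--                 c = c.lower()
--             out.append(c)
--             p += 1
--     out.reverse()
--     return 'u_' + ''.join(out)
-- ===== Notes on version B (the rewrite author's own statement) =====
-- stated objective: alternative
-- what changed: A carries a mutable mask shifted right at each non-binary character in one forward pass; B first counts the non-binary slots, then walks the tag back-to-front with an increasing bit position tested directly against formula, reversing the result.
import Mathlib
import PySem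

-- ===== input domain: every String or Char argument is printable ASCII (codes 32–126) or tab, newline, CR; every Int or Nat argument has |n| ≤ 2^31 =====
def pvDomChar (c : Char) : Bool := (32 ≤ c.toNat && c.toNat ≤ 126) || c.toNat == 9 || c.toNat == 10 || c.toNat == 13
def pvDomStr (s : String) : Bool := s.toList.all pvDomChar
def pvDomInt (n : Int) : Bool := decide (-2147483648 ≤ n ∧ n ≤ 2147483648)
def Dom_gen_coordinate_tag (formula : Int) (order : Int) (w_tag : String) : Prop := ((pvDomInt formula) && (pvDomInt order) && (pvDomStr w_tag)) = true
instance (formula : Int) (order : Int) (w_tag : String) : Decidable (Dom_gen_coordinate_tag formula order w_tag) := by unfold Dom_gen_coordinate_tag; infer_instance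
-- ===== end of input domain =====

-- B replaces A's stateful shifting mask by a count-first, back-to-front pass with an
-- increasing bit position (objective: alternative decomposition, same cost).

-- ===== PORT A =====
-- the for-loop over enumerate(desc) carrying the mutable mask aux
def pvGoA (formula : Int) : Int → List Char → List Char
  | _, [] => []
  | aux, c :: rest =>
    if c = '0' ∨ c = '1' then c :: pvGoA formula aux rest
    else
      let aux' := aux >>> (1 : Nat)
      if PySem.Int.band formula aux' = 0 then
        PySem.Chars.lowerChar c :: pvGoA formula aux' rest
      else
        c :: pvGoA formula aux' rest

def gen_coordinate_tag (formula : Int) (order : Int) (w_tag : String) : String :=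
  -- aux = 1 << order (order ≥ 0 inside Pre_); 'u_' + ''.join(desc)
  String.mk ('u' :: '_' :: pvGoA formula ((1 : Int) <<< order.toNat) w_tag.toList)

-- ===== PORT B =====
-- the reversed for-loop carrying the increasing bit position p
def pvGoB (formula : Int) : Int → List Char → List Char
  | _, [] => []
  | p, c :: rest =>
    if c = '0' ∨ c = '1' then c :: pvGoB formula p rest
    else
      (if p < 0 ∨ PySem.Int.band formula ((1 : Int) <<< p.toNat) = 0 then
        PySem.Chars.lowerChar c else c) :: pvGoB formula (p + 1) rest

def gen_coordinate_tag_alt (formula : Int) (order : Int) (w_tag : String) : String :=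
  let cs := w_tag.toList
  let m : Nat := cs.countP (fun c => !(c = '0' ∨ c = '1' : Bool))  -- sum(1 for c if c not in '01')
  let out := (pvGoB formula (order - (m : Int)) cs.reverse).reverse
  String.mk ('u' :: '_' :: out)

-- ===== PRECONDITION & SPEC =====
-- Pre_ excludes order < 0, where A's '1 << order' raises ValueError (negative shift count).
def Pre_gen_coordinate_tag (formula : Int) (order : Int) (w_tag : String) : Prop := 0 ≤ order
instance (formula : Int) (order : Int) (w_tag : String) : Decidable (Pre_gen_coordinate_tag formula order w_tag) := by unfold Pre_gen_coordinate_tag; infer_instance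
def pvWitness_gen_coordinate_tag : Int × Int × String := (5, 2, "aB1c")

def Spec_gen_coordinate_tag (formula : Int) (order : Int) (w_tag : String) (out : String) : Prop := out = gen_coordinate_tag_alt formula order w_tag
instance (formula : Int) (order : Int) (w_tag : String) (out : String) : Decidable (Spec_gen_coordinate_tag formula order w_tag out) := by unfold Spec_gen_coordinate_tag; infer_instance

-- ===== CLAIM (what is proved, stated in full; the proofs are below) =====
def Claim_equal_gen_coordinate_tag : Prop := ∀ (formula : Int) (order : Int) (w_tag : String), Dom_gen_coordinate_tag formula order w_tag → Pre_gen_coordinate_tag formula order w_tag → Spec_gen_coordinate_tag formula order w_tag (gen_coordinate_tag formula order w_tag)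

-- ===== LEMMAS AND PROOFS =====

-- common forward characterisation: k = number of non-binary characters already consumed
def pvGoC (f : Int) (o : Nat) : Nat → List Char → List Char
  | _, [] => []
  | k, c :: rest =>
    if c = '0' ∨ c = '1' then c :: pvGoC f o k rest
    else
      (if PySem.Int.band f (((1 : Int) <<< o) >>> (k + 1)) = 0 then
        PySem.Chars.lowerChar c else c) :: pvGoC f o (k + 1) rest

theorem pv_shift_shift (o k : Nat) : (((1 : Int) <<< o) >>> k) >>> (1 : Nat) = ((1 : Int) <<< o) >>> (k + 1) := rfl

theorem pv_goA_eq_goC (f : Int) (o : Nat) (l : List Char) (k : Nat) :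
    pvGoA f (((1 : Int) <<< o) >>> k) l = pvGoC f o k l := by
  induction l generalizing k with
  | nil => rfl
  | cons c rest ih =>
    by_cases hc : c = '0' ∨ c = '1'
    · simp only [pvGoA, pvGoC, if_pos hc, ih k]
    · simp only [pvGoA, pvGoC, if_neg hc, pv_shift_shift o k, ih (k + 1)]
      split <;> rfl

-- the bit test A performs on the shifted mask is the guarded single-bit test B performs
theorem pv_bit (f : Int) (o j : Nat) :
    (PySem.Int.band f (((1 : Int) <<< o) >>> j) = 0) ↔
      ((o : Int) - (j : Int) < 0 ∨ PySem.Int.band f ((1 : Int) <<< ((o : Int) - (j : Int)).toNat) = 0) := by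
  by_cases h : j ≤ o
  · have hmask : ((1 : Int) <<< o) >>> j = (1 : Int) <<< (o - j) :=
      Int.shiftLeft_shiftRight_eq_shiftLeft_of_le h 1
    have htn : ((o : Int) - (j : Int)).toNat = o - j := by omega
    have hge : ¬ ((o : Int) - (j : Int) < 0) := by omega
    rw [hmask, htn]
    exact ⟨fun hz => Or.inr hz, fun hz => hz.elim (fun c => absurd c hge) id⟩
  · have ho : o < j := by omega
    have h1 : (1 : Int) <<< o = ((1 <<< o : Nat) : Int) := rfl
    have h2 : (((1 <<< o : Nat) : Int)) >>> j = (((1 <<< o : Nat) >>> j : Nat) : Int) := rfl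
    have h3 : (1 <<< o : Nat) >>> j = 0 := by
      rw [Nat.one_shiftLeft, Nat.shiftRight_eq_div_pow]
      exact Nat.div_eq_of_lt (Nat.pow_lt_pow_right (by norm_num) ho)
    have hlt : (o : Int) - (j : Int) < 0 := by omega
    rw [h1, h2, h3]
    simp [PySem.Int.band_zero, hlt]

def pvNb (l : List Char) : Nat := l.countP (fun c => !(c = '0' ∨ c = '1' : Bool))

theorem pv_goB_append (f : Int) (p : Int) (xs ys : List Char) :
    pvGoB f p (xs ++ ys) = pvGoB f p xs ++ pvGoB f (p + (pvNb xs : Int)) ys := by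
  induction xs generalizing p with
  | nil => simp [pvGoB, pvNb]
  | cons c rest ih =>
    by_cases hc : c = '0' ∨ c = '1'
    · have hnb : (pvNb (c :: rest) : Int) = (pvNb rest : Int) := by
        rcases hc with h | h <;> simp [pvNb, List.countP_cons, h]
      simp only [List.cons_append, pvGoB, if_pos hc, ih p, hnb]
    · have hnb : (pvNb (c :: rest) : Int) = (pvNb rest : Int) + 1 := by
        push_neg at hc
        simp [pvNb, List.countP_cons, hc.1, hc.2]
      simp only [List.cons_append, pvGoB, if_neg hc, ih (p + 1), hnb]
      ring_nf

theorem pv_goB_eq_goC (f : Int) (o : Nat) (l : List Char) (k : Nat) :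
    (pvGoB f ((o : Int) - (k : Int) - (pvNb l : Int)) l.reverse).reverse = pvGoC f o k l := by
  induction l generalizing k with
  | nil => rfl
  | cons c rest ih =>
    rw [List.reverse_cons, pv_goB_append]
    have hrev : pvNb rest.reverse = pvNb rest := by
      simp [pvNb, List.countP_reverse]
    by_cases hc : c = '0' ∨ c = '1'
    · have hnb : pvNb (c :: rest) = pvNb rest := by
        rcases hc with h | h <;> simp [pvNb, List.countP_cons, h]
      have hq : (o : Int) - (k : Int) - (pvNb (c :: rest) : Int) + (pvNb rest.reverse : Int)
          = (o : Int) - (k : Int) := by rw [hnb, hrev]; ring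
      have hp : (o : Int) - (k : Int) - (pvNb (c :: rest) : Int)
          = (o : Int) - (k : Int) - (pvNb rest : Int) := by rw [hnb]
      rw [hq, hp]
      have hsing : pvGoB f ((o : Int) - (k : Int)) [c] = [c] := by
        simp [pvGoB, hc]
      rw [hsing, List.reverse_append, List.reverse_singleton, List.singleton_append, ih k]
      simp [pvGoC, hc]
    · have hnb : pvNb (c :: rest) = pvNb rest + 1 := by
        push_neg at hc
        simp [pvNb, List.countP_cons, hc.1, hc.2]
      have hq : (o : Int) - (k : Int) - (pvNb (c :: rest) : Int) + (pvNb rest.reverse : Int)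
          = (o : Int) - ((k + 1 : Nat) : Int) := by rw [hnb, hrev]; push_cast; ring
      have hp : (o : Int) - (k : Int) - (pvNb (c :: rest) : Int)
          = (o : Int) - ((k + 1 : Nat) : Int) - (pvNb rest : Int) := by
        rw [hnb]; push_cast; ring
      rw [hq, hp]
      have hsing : pvGoB f ((o : Int) - ((k + 1 : Nat) : Int)) [c]
          = [if (o : Int) - ((k + 1 : Nat) : Int) < 0 ∨
                PySem.Int.band f ((1 : Int) <<< ((o : Int) - ((k + 1 : Nat) : Int)).toNat) = 0
              then PySem.Chars.lowerChar c else c] := by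
        simp [pvGoB, hc]
      rw [hsing, List.reverse_append, List.reverse_singleton, List.singleton_append, ih (k + 1)]
      simp only [pvGoC, if_neg hc]
      simp only [← pv_bit f o (k + 1)]

-- ===== VERDICT (by name: the statement is the Claim_ definition above) =====
theorem gen_coordinate_tag_spec : Claim_equal_gen_coordinate_tag := by
  intro f order w _ hpre
  have ho : ((order.toNat : Nat) : Int) = order := Int.toNat_of_nonneg hpre
  simp only [Spec_gen_coordinate_tag, gen_coordinate_tag, gen_coordinate_tag_alt]
  have h0A : ((1 : Int) <<< order.toNat) = ((1 : Int) <<< order.toNat) >>> (0 : Nat) := rfl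
  rw [h0A, pv_goA_eq_goC f order.toNat w.toList 0]
  rw [← pv_goB_eq_goC f order.toNat w.toList 0]
  have harg : order - ((w.toList.countP (fun c => !(c = '0' ∨ c = '1' : Bool)) : Nat) : Int)
      = ((order.toNat : Nat) : Int) - ((0 : Nat) : Int) - ((pvNb w.toList : Nat) : Int) := by
    have : w.toList.countP (fun c => !(c = '0' ∨ c = '1' : Bool)) = pvNb w.toList := rfl
    rw [this, ho]
    push_cast
    ring
  rw [harg]
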